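-- pv_equiv track=rewrite | github.com/neuroanimal/ai_platform | code/backend/service_layer/format_processing/path_query/path_query_processor.py | _validate_xpath_syntax
-- ===== SOURCE A (Python) =====
-- def _validate_xpath_syntax(xpath: str) -> bool:
--     """Basic XPath syntax validation"""
--     # Check for balanced brackets
--     if xpath.count('[') != xpath.count(']'):
--         return False
--
--     # Check for balanced parentheses
--     if xpath.count('(') != xpath.count(')'):
--         return False
--
--     # Check for valid XPath characters
--     invalid_chars = ['<', '>', '&']
--     if any(char in xpath for char in invalid_chars):
--         return False
--
--     return True
-- ===== SOURCE B (Python) =====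
-- def _validate_xpath_syntax(xpath: str) -> bool:
--     """Basic XPath syntax validation: one pass with bracket counters."""
--     lb = rb = lp = rp = 0
--     for ch in xpath:
--         if ch == '<' or ch == '>' or ch == '&':
--             return False
--         if ch == '[':
--             lb += 1
--         elif ch == ']':
--             rb += 1
--         elif ch == '(':
--             lp += 1
--         elif ch == ')':
--             rp += 1
--     return lb == rb and lp == rp
-- ===== Notes on version B (the rewrite author's own statement) =====
-- stated objective: alternative
-- what changed: Replaces A's four separate .count() scans plus an any()-of-substring scan with a single left-to-right pass maintaining four bracket counters and bailing out immediately on an invalid character.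
import Mathlib
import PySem

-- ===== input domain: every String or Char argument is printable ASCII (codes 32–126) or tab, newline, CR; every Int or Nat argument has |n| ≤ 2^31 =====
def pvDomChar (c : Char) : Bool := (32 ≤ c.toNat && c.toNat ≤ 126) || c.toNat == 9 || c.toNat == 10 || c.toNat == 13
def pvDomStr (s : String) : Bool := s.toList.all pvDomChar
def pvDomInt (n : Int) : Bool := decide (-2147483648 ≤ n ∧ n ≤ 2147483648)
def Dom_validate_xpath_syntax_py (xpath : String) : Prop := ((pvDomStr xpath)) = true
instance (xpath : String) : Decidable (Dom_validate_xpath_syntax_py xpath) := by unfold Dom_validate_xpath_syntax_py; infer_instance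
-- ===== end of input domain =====

-- B replaces A's four .count() scans plus an any() substring scan with one pass keeping four counters (objective: alternative, same cost).

-- ===== PORT A =====
def validate_xpath_syntax_py (xpath : String) : Bool :=
  if PySem.Str.count xpath "[" ≠ PySem.Str.count xpath "]" then false
  else if PySem.Str.count xpath "(" ≠ PySem.Str.count xpath ")" then false
  else
    let invalid_chars : List String := ["<", ">", "&"]
    if invalid_chars.any (fun ch => PySem.Str.isIn ch xpath) then false
    else true

-- ===== PORT B =====
def bScan : List Char → Nat → Nat → Nat → Nat → Bool
  | [], lb, rb, lp, rp => lb == rb && lp == rp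
  | c :: rest, lb, rb, lp, rp =>
    if c == '<' || c == '>' || c == '&' then false
    else if c == '[' then bScan rest (lb + 1) rb lp rp
    else if c == ']' then bScan rest lb (rb + 1) lp rp
    else if c == '(' then bScan rest lb rb (lp + 1) rp
    else if c == ')' then bScan rest lb rb lp (rp + 1)
    else bScan rest lb rb lp rp

def validate_xpath_syntax_py_alt (xpath : String) : Bool :=
  bScan xpath.toList 0 0 0 0

-- ===== PRECONDITION & SPEC =====
def Spec_validate_xpath_syntax_py (xpath : String) (out : Bool) : Prop := out = validate_xpath_syntax_py_alt xpath
instance (xpath : String) (out : Bool) : Decidable (Spec_validate_xpath_syntax_py xpath out) := by unfold Spec_validate_xpath_syntax_py; infer_instance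

-- ===== CLAIM (what is proved, stated in full; the proofs are below) =====
def Claim_equal_validate_xpath_syntax_py : Prop := ∀ (xpath : String), Dom_validate_xpath_syntax_py xpath → Spec_validate_xpath_syntax_py xpath (validate_xpath_syntax_py xpath)

-- ===== LEMMAS AND PROOFS =====

theorem count_go_single (c : Char) : ∀ (s : List Char) (fuel acc : Nat), s.length ≤ fuel →
    PySem.Chars.count.go [c] fuel s acc = acc + s.count c := by
  intro s
  induction s with
  | nil =>
    intro fuel acc _
    cases fuel <;> simp [PySem.Chars.count.go]
  | cons h t ih =>
    intro fuel acc hle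
    cases fuel with
    | zero => simp at hle
    | succ f =>
      have hf : t.length ≤ f := by simpa using hle
      by_cases hc : c = h
      · subst hc
        simp [PySem.Chars.count.go, List.isPrefixOf, ih f (acc + 1) hf]
        omega
      · have hpre : ([c].isPrefixOf (h :: t)) = false := by
          simp [List.isPrefixOf]; exact fun he => (hc he).elim
        simp [PySem.Chars.count.go, hpre, ih f acc hf,
          Ne.symm hc]

theorem count_single (s : List Char) (c : Char) :
    PySem.Chars.count s [c] = s.count c := by
  simp [PySem.Chars.count, count_go_single c s s.length 0 le_rfl]

theorem isIn_single (c : Char) (l : List Char) :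
    PySem.Chars.isIn [c] l = l.contains c := by
  by_cases h : c ∈ l
  · have : PySem.Chars.isIn [c] l = true := by
      rw [PySem.Chars.isIn_iff_infix]
      obtain ⟨s1, s2, rfl⟩ := List.append_of_mem h
      exact ⟨s1, s2, by simp⟩
    simp [this, h]
  · have : PySem.Chars.isIn [c] l = false := by
      rw [PySem.Chars.isIn_eq_false_iff]
      intro hinf
      exact h (hinf.mem (by simp : c ∈ [c]))
    simp [this, h]

theorem bScan_eq (l : List Char) : ∀ (lb rb lp rp : Nat),
    bScan l lb rb lp rp =
      (!(l.any (fun c => c == '<' || c == '>' || c == '&')) &&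
        ((lb + l.count '[' == rb + l.count ']') &&
         (lp + l.count '(' == rp + l.count ')'))) := by
  induction l with
  | nil => intro lb rb lp rp; simp [bScan]
  | cons c rest ih =>
    intro lb rb lp rp
    by_cases h1 : c = '<'
    · subst h1; simp [bScan]
    · by_cases h2 : c = '>'
      · subst h2; simp [bScan]
      · by_cases h3 : c = '&'
        · subst h3; simp [bScan]
        · have e1 : (c == '<') = false := by simp [h1]
          have e2 : (c == '>') = false := by simp [h2]
          have e3 : (c == '&') = false := by simp [h3]
          by_cases h4 : c = '['
          · subst h4
            simp [bScan, ih, Nat.add_assoc, Nat.add_comm, Nat.add_left_comm]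
          · by_cases h5 : c = ']'
            · subst h5
              simp [bScan, ih, Nat.add_assoc, Nat.add_comm, Nat.add_left_comm]
            · by_cases h6 : c = '('
              · subst h6
                simp [bScan, ih, Nat.add_assoc, Nat.add_comm, Nat.add_left_comm]
              · by_cases h7 : c = ')'
                · subst h7
                  simp [bScan, ih, Nat.add_assoc, Nat.add_comm, Nat.add_left_comm]
                · simp [bScan, h4, h5, h6, h7, e1, e2, e3, ih]

-- ===== VERDICT (by name: the statement is the Claim_ definition above) =====
theorem validate_xpath_syntax_py_spec : Claim_equal_validate_xpath_syntax_py := by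
  unfold Claim_equal_validate_xpath_syntax_py
  intro xpath _
  unfold Spec_validate_xpath_syntax_py validate_xpath_syntax_py validate_xpath_syntax_py_alt
  rw [bScan_eq]
  have hc : ∀ (t : String) (c : Char), t.toList = [c] →
      PySem.Str.count xpath t = xpath.toList.count c := by
    intro t c ht
    simp [PySem.Str.count, ht, count_single]
  have hi : ∀ (t : String) (c : Char), t.toList = [c] →
      PySem.Str.isIn t xpath = xpath.toList.contains c := by
    intro t c ht
    simp [PySem.Str.isIn, ht, isIn_single]
  rw [hc "[" '[' (by simp), hc "]" ']' (by simp), hc "(" '(' (by simp),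
    hc ")" ')' (by simp)]
  simp only [List.any_cons, List.any_nil, Bool.or_false, hi "<" '<' (by simp),
    hi ">" '>' (by simp), hi "&" '&' (by simp), Nat.zero_add]
  have hany : (xpath.toList.contains '<' || (xpath.toList.contains '>' || xpath.toList.contains '&')) =
      (xpath.toList.any fun c => c == '<' || c == '>' || c == '&') := by
    rw [Bool.eq_iff_iff]
    simp [List.any_eq_true]
    constructor
    · rintro (h | h | h) <;> exact ⟨_, h, by simp⟩
    · rintro ⟨x, hx, (rfl | rfl) | rfl⟩ <;> tauto
  rw [hany]
  by_cases hb : List.count '[' xpath.toList = List.count ']' xpath.toList <;>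
    by_cases hp : List.count '(' xpath.toList = List.count ')' xpath.toList <;>
      cases hA : (xpath.toList.any fun c => c == '<' || c == '>' || c == '&') <;>
        simp [hb, hp, beq_iff_eq]
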